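-- pv_equiv track=rewrite | github.com/skalex05/Python-Assistant | main.py | FilterAndSeperate
-- ===== SOURCE A (Python) =====
-- invalidCharacters = [" ","!",",","?","'","",":",";",")","(","[","]","{","}"]
--
-- def FilterAndSeperate(text,exclusion = invalidCharacters):
--     result = []
--     word = ""
--     for char in text:
--         if not char in exclusion:
--             word += char
--         if char == exclusion[0]:
--             result.append(word)
--             word = ""
--     result.append(word)
--     return result
-- ===== SOURCE B (Python) =====
-- invalidCharacters = [" ","!",",","?","'","",":",";",")","(","[","]","{","}"]
--
-- def FilterAndSeperate(text, exclusion = invalidCharacters):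
--     delim = exclusion[0]
--     excluded = set(exclusion)
--     cuts = [i for i, c in enumerate(text) if c == delim]
--     starts = [0] + [i + 1 for i in cuts]
--     ends = cuts + [len(text)]
--     return [''.join(c for c in text[a:b] if c not in excluded)
--             for a, b in zip(starts, ends)]
-- ===== Notes on version B (the rewrite author's own statement) =====
-- stated objective: faster
-- what changed: A's single interleaved loop (accumulate filtered chars, flush on the delimiter) is replaced by two differently-shaped passes - first compute the delimiter cut positions and the segment bounds, then build each output word by filtering a slice of the text - with membership tested against a set instead of rescanning the exclusion list per character.
-- outside the precondition, e.g. on FilterAndSeperate('', []): A returns [''], B raises IndexError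
import Mathlib
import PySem

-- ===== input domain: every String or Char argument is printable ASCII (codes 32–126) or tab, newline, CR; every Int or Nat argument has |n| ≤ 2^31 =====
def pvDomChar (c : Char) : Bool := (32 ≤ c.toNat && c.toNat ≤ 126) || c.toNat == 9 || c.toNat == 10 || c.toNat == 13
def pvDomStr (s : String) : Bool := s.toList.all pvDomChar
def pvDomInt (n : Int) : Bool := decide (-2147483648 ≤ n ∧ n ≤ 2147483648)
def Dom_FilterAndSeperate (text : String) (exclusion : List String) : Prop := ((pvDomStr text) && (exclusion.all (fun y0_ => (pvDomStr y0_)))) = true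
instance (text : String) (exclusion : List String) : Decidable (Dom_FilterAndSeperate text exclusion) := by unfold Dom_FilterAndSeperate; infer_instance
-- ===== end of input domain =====

-- B replaces A's single interleaved accumulate-and-flush character loop by two differently
-- shaped passes — first compute the delimiter cut positions and segment bounds, then filter
-- each slice, testing membership against a set instead of rescanning the exclusion list.

-- ===== PORT A =====
-- A's loop: word accumulates chars not in exclusion, flushed to result when char == exclusion[0].
def FilterAndSeperate (text : String) (exclusion : List String) : List String :=
  let d : String := (PySem.List.pyGet? exclusion 0).getD ""   -- exclusion[0]; Pre_ guarantees it exists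
  let st := text.toList.foldl
    (fun (acc : List String × List Char) char =>
      let word := if exclusion.contains (String.ofList [char]) then acc.2 else acc.2 ++ [char]
      if String.ofList [char] == d then (acc.1 ++ [String.ofList word], []) else (acc.1, word))
    ([], [])
  st.1 ++ [String.ofList st.2]

-- ===== PORT B =====
-- Source B: cut positions, then segment bounds, then filter each slice (membership via a set).
def FilterAndSeperate_alt (text : String) (exclusion : List String) : List String :=
  let d : String := (PySem.List.pyGet? exclusion 0).getD ""
  let excluded : PySem.Set String := PySem.Set.ofList exclusion
  let cs := text.toList
  let cuts : List Int :=
    (PySem.List.enumerate cs 0).filterMap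
      (fun p => if String.ofList [p.2] == d then some p.1 else none)
  let starts : List Int := 0 :: cuts.map (· + 1)
  let ends : List Int := cuts ++ [(cs.length : Int)]
  (starts.zip ends).map
    (fun q => String.ofList ((PySem.List.slice cs (some q.1) (some q.2)).filter
      (fun c => !(excluded.contains (String.ofList [c])))))

-- ===== PRECONDITION & SPEC =====
-- Pre_ excludes only exclusion = []: there A raises IndexError on any nonempty text (and on
-- empty text accidentally returns [""] while B's exclusion[0] lookup raises).
def Pre_FilterAndSeperate (_text : String) (exclusion : List String) : Prop := exclusion ≠ []
instance (text : String) (exclusion : List String) : Decidable (Pre_FilterAndSeperate text exclusion) := by unfold Pre_FilterAndSeperate; infer_instance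

def pvWitness_FilterAndSeperate : String × List String := ("hi there!", [" ", "!", ","])

def Spec_FilterAndSeperate (text : String) (exclusion : List String) (out : List String) : Prop := out = FilterAndSeperate_alt text exclusion
instance (text : String) (exclusion : List String) (out : List String) : Decidable (Spec_FilterAndSeperate text exclusion out) := by unfold Spec_FilterAndSeperate; infer_instance

-- ===== CLAIM (what is proved, stated in full; the proofs are below) =====
def Claim_equal_FilterAndSeperate : Prop := ∀ (text : String) (exclusion : List String), Dom_FilterAndSeperate text exclusion → Pre_FilterAndSeperate text exclusion → Spec_FilterAndSeperate text exclusion (FilterAndSeperate text exclusion)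

-- ===== LEMMAS AND PROOFS =====

-- the common reference shape: the segments of cs between the characters satisfying p
def pvSegs (p : Char → Bool) : List Char → List (List Char)
  | [] => [[]]
  | c :: cs =>
    if p c then [] :: pvSegs p cs
    else
      match pvSegs p cs with
      | [] => [[c]]   -- unreachable
      | s :: ss => (c :: s) :: ss

theorem pvSegs_ne_nil (p : Char → Bool) (cs : List Char) : pvSegs p cs ≠ [] := by
  induction cs with
  | nil => simp [pvSegs]
  | cons c cs ih =>
    simp only [pvSegs]
    split
    · simp
    · cases h : pvSegs p cs with
      | nil => simp
      | cons s ss => simp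

-- A's running word prefixed to the first remaining segment
def pvGlue (keep : Char → Bool) (word : List Char) : List (List Char) → List String
  | [] => []
  | s :: ss => String.ofList (word ++ s.filter keep) :: ss.map (fun t => String.ofList (t.filter keep))

theorem pvGlue_nil_word (keep : Char → Bool) (ss : List (List Char)) (h : ss ≠ []) :
    pvGlue keep [] ss = ss.map (fun t => String.ofList (t.filter keep)) := by
  cases ss with
  | nil => simp at h
  | cons s ss => simp [pvGlue]

-- A's loop body and finishing step, named for the proofs
def pvStepA (exclusion : List String) (d : String) (acc : List String × List Char) (char : Char) :
    List String × List Char :=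
  let word := if exclusion.contains (String.ofList [char]) then acc.2 else acc.2 ++ [char]
  if String.ofList [char] == d then (acc.1 ++ [String.ofList word], []) else (acc.1, word)

def pvFinA (st : List String × List Char) : List String := st.1 ++ [String.ofList st.2]

-- A's fold equals gluing the word onto the filtered segments
theorem pvA_aux (exclusion : List String) (d : String) (hd : exclusion.contains d = true)
    (cs : List Char) : ∀ (res : List String) (word : List Char),
    pvFinA (cs.foldl (pvStepA exclusion d) (res, word)) =
    res ++ pvGlue (fun c => !(exclusion.contains (String.ofList [c]))) word
      (pvSegs (fun c => String.ofList [c] == d) cs) := by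
  induction cs with
  | nil => intro res word; simp [pvFinA, pvGlue, pvSegs]
  | cons c cs ih =>
    intro res word
    rw [List.foldl_cons]
    by_cases hpc : (String.ofList [c] == d) = true
    · have hmem : exclusion.contains (String.ofList [c]) = true := by
        rw [beq_iff_eq] at hpc; rw [hpc]; exact hd
      have hstep : pvStepA exclusion d (res, word) c = (res ++ [String.ofList word], []) := by
        have hmem' : String.ofList [c] ∈ exclusion := by simpa using hmem
        simp [pvStepA, hmem', hpc]
      rw [hstep, ih (res ++ [String.ofList word]) []]
      simp only [pvSegs, hpc, if_true]
      rw [pvGlue_nil_word _ _ (pvSegs_ne_nil _ _)]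
      cases h : pvSegs (fun c => String.ofList [c] == d) cs with
      | nil => exact absurd h (pvSegs_ne_nil _ _)
      | cons s ss => simp [pvGlue]
    · have hpc' : (String.ofList [c] == d) = false := by simpa using hpc
      by_cases hk : exclusion.contains (String.ofList [c]) = true
      · have hstep : pvStepA exclusion d (res, word) c = (res, word) := by
          have hk2 : String.ofList [c] ∈ exclusion := by simpa using hk
          simp [pvStepA, hk2, hpc']
        rw [hstep, ih res word]
        simp only [pvSegs, hpc', Bool.false_eq_true, if_false]
        cases h : pvSegs (fun c => String.ofList [c] == d) cs with
        | nil => exact absurd h (pvSegs_ne_nil _ _)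
        | cons s ss =>
          have hk3 : String.ofList [c] ∈ exclusion := by simpa using hk
          simp [pvGlue, hk3]
      · have hk' : exclusion.contains (String.ofList [c]) = false := by simpa using hk
        have hstep : pvStepA exclusion d (res, word) c = (res, word ++ [c]) := by
          have hk2 : String.ofList [c] ∉ exclusion := by simpa using hk
          simp [pvStepA, hk2, hpc']
        rw [hstep, ih res (word ++ [c])]
        simp only [pvSegs, hpc', Bool.false_eq_true, if_false]
        cases h : pvSegs (fun c => String.ofList [c] == d) cs with
        | nil => exact absurd h (pvSegs_ne_nil _ _)
        | cons s ss =>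
          have hk3 : String.ofList [c] ∉ exclusion := by simpa using hk
          simp [pvGlue, hk3]

-- enumerate shifts its start by mapping +1 over the indices
theorem pvEnumShift {α : Type} (xs : List α) : ∀ s : Int,
    PySem.List.enumerate xs (s + 1) = (PySem.List.enumerate xs s).map (fun q => (q.1 + 1, q.2)) := by
  induction xs with
  | nil => intro s; simp [PySem.List.enumerate_nil]
  | cons x xs ih => intro s; simp [PySem.List.enumerate_cons, ih (s + 1)]

-- cut indices are nonnegative
theorem pvCuts_nonneg (p : Char → Bool) (cs : List Char) (i : Int)
    (hi : i ∈ (PySem.List.enumerate cs 0).filterMap (fun q => if p q.2 then some q.1 else none)) :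
    0 ≤ i := by
  obtain ⟨q, hq, hqi⟩ := List.mem_filterMap.mp hi
  obtain ⟨k, hk, rfl⟩ := (PySem.List.mem_enumerate_iff _ _ _).mp hq
  by_cases h : p (cs[k]) <;> simp [h] at hqi
  omega

-- slicing behind a fixed head shifts both bounds by one
theorem pvSliceShift {α : Type} (x : α) (xs : List α) (a b : Int) (ha : 0 ≤ a) (hb : 0 ≤ b) :
    PySem.List.slice (x :: xs) (some (a + 1)) (some (b + 1)) = PySem.List.slice xs (some a) (some b) := by
  rw [PySem.List.slice_toNat _ (by omega) (by omega), PySem.List.slice_toNat _ ha hb]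
  have h1 : (a + 1).toNat = a.toNat + 1 := by omega
  have h2 : (b + 1).toNat = b.toNat + 1 := by omega
  rw [h1, h2, List.drop_succ_cons]
  congr 1
  omega

-- a slice from 0 whose end moves right by one absorbs the head
theorem pvSliceHead {α : Type} (x : α) (xs : List α) (b : Int) (hb : 0 ≤ b) :
    PySem.List.slice (x :: xs) (some 0) (some (b + 1)) = x :: PySem.List.slice xs (some 0) (some b) := by
  rw [PySem.List.slice_toNat _ (by omega) (by omega), PySem.List.slice_toNat _ le_rfl hb]
  have h2 : (b + 1).toNat = b.toNat + 1 := by omega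
  simp [h2]

-- B's bounds-and-slices pass equals the segments
theorem pvB_eq (p : Char → Bool) (cs : List Char) :
    (((0 : Int) :: ((PySem.List.enumerate cs 0).filterMap
        (fun q => if p q.2 then some q.1 else none)).map (· + 1)).zip
      (((PySem.List.enumerate cs 0).filterMap
        (fun q => if p q.2 then some q.1 else none)) ++ [(cs.length : Int)])).map
      (fun q => PySem.List.slice cs (some q.1) (some q.2)) =
    pvSegs p cs := by
  induction cs with
  | nil =>
    simp [PySem.List.enumerate_nil, pvSegs, PySem.List.slice_toNat ([] : List Char) le_rfl le_rfl]
  | cons c cs ih =>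
    have hK : (PySem.List.enumerate (c :: cs) 0).filterMap (fun q => if p q.2 then some q.1 else none) =
        (if p c then [(0 : Int)] else []) ++
          ((PySem.List.enumerate cs 0).filterMap (fun q => if p q.2 then some q.1 else none)).map (· + 1) := by
      rw [PySem.List.enumerate_cons, pvEnumShift, List.filterMap_cons, List.filterMap_map,
        List.map_filterMap]
      by_cases hpc : p c <;> simp [hpc, apply_ite (Option.map (· + (1 : Int)))]
    set K := (PySem.List.enumerate cs 0).filterMap (fun q => if p q.2 then some q.1 else none) with hKdef
    have hKpos : ∀ i ∈ K, (0 : Int) ≤ i := fun i hi => pvCuts_nonneg p cs i hi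
    have hlen : ((c :: cs).length : Int) = (cs.length : Int) + 1 := by push_cast [List.length_cons]; ring
    have hEnds : ∀ i ∈ K ++ [(cs.length : Int)], (0 : Int) ≤ i := by
      intro i hi
      rcases List.mem_append.mp hi with h | h
      · exact hKpos i h
      · simp at h; omega
    have hStarts : ∀ i ∈ (0 : Int) :: K.map (· + 1), (0 : Int) ≤ i := by
      intro i hi
      rcases List.mem_cons.mp hi with rfl | h
      · exact le_rfl
      · obtain ⟨j, hj, rfl⟩ := List.mem_map.mp h
        have := hKpos j hj; omega
    have hShift : ∀ q ∈ (((0 : Int) :: K.map (· + 1)).zip (K ++ [(cs.length : Int)])),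
        PySem.List.slice (c :: cs) (some (q.1 + 1)) (some (q.2 + 1)) =
          PySem.List.slice cs (some q.1) (some q.2) := by
      intro q hq
      obtain ⟨h1, h2⟩ := List.of_mem_zip (a := q.1) (b := q.2) (by simpa using hq)
      exact pvSliceShift c cs q.1 q.2 (hStarts _ h1) (hEnds _ h2)
    by_cases hpc : p c
    · rw [hK, hlen]
      simp only [hpc, if_true]
      have hz : (((0 : Int) :: ([(0 : Int)] ++ K.map (· + 1)).map (· + 1)).zip
            (([(0 : Int)] ++ K.map (· + 1)) ++ [(cs.length : Int) + 1])) =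
          ((0 : Int), (0 : Int)) ::
            ((((0 : Int) :: K.map (· + 1)).map (· + 1)).zip ((K ++ [(cs.length : Int)]).map (· + 1))) := by
        simp [List.map_append]
      rw [hz, List.map_cons, List.zip_map, List.map_map]
      have hhead : PySem.List.slice (c :: cs) (some (0 : Int)) (some (0 : Int)) = [] := by
        rw [PySem.List.slice_toNat _ le_rfl le_rfl]; simp
      have htail : ∀ q ∈ (((0 : Int) :: K.map (· + 1)).zip (K ++ [(cs.length : Int)])),
          ((fun q => PySem.List.slice (c :: cs) (some q.1) (some q.2)) ∘ Prod.map (· + 1) (· + 1)) q =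
            PySem.List.slice cs (some q.1) (some q.2) := by
        intro q hq
        simpa using hShift q hq
      rw [List.map_congr_left htail, ih]
      simp [pvSegs, hpc, hhead]
    · rw [hK, hlen]
      simp only [hpc, Bool.false_eq_true, if_false, List.nil_append]
      obtain ⟨e, es, hE⟩ : ∃ e es, K ++ [(cs.length : Int)] = e :: es := by
        cases h : K ++ [(cs.length : Int)] with
        | nil => exact absurd h (by simp)
        | cons e es => exact ⟨e, es, rfl⟩
      have ih' : PySem.List.slice cs (some 0) (some e) ::
          ((K.map (· + 1)).zip es).map (fun q => PySem.List.slice cs (some q.1) (some q.2)) =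
          pvSegs p cs := by
        rw [← ih, hE]; rfl
      have he : (0 : Int) ≤ e := hEnds e (by rw [hE]; simp)
      have hz : (((0 : Int) :: (K.map (· + 1)).map (· + 1)).zip (K.map (· + 1) ++ [(cs.length : Int) + 1])) =
          ((0 : Int), e + 1) :: (((K.map (· + 1)).zip es).map (Prod.map (· + 1) (· + 1))) := by
        have : K.map (· + 1) ++ [(cs.length : Int) + 1] = (e + 1) :: es.map (· + 1) := by
          have : K.map (· + 1) ++ [(cs.length : Int) + 1] = (K ++ [(cs.length : Int)]).map (· + 1) := by
            simp [List.map_append]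
          rw [this, hE]; simp
        rw [this, List.zip_cons_cons, List.zip_map]
      rw [hz, List.map_cons]
      have hhead : PySem.List.slice (c :: cs) (some (0 : Int)) (some (e + 1)) =
          c :: PySem.List.slice cs (some 0) (some e) := pvSliceHead c cs e he
      have htail : ∀ q ∈ ((K.map (· + 1)).zip es),
          ((fun q => PySem.List.slice (c :: cs) (some q.1) (some q.2)) ∘ Prod.map (· + 1) (· + 1)) q =
            PySem.List.slice cs (some q.1) (some q.2) := by
        intro q hq
        obtain ⟨h1, h2⟩ := List.of_mem_zip (a := q.1) (b := q.2) (by simpa using hq)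
        obtain ⟨j, hj, hjq⟩ := List.mem_map.mp h1
        have hj0 := hKpos j hj
        have h10 : (0 : Int) ≤ q.1 := hjq ▸ (by omega : (0 : Int) ≤ j + 1)
        have h2' : q.2 ∈ K ++ [(cs.length : Int)] := by rw [hE]; exact List.mem_cons_of_mem _ h2
        simpa using pvSliceShift c cs q.1 q.2 h10 (hEnds _ h2')
      rw [List.map_map, List.map_congr_left htail, hhead]
      simp only [pvSegs, hpc, Bool.false_eq_true, if_false]
      rw [← ih']

-- ===== VERDICT (by name: the statement is the Claim_ definition above) =====
theorem FilterAndSeperate_spec : Claim_equal_FilterAndSeperate := by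
  intro text exclusion _ hpre
  unfold Spec_FilterAndSeperate
  obtain ⟨e, rest, rfl⟩ : ∃ e rest, exclusion = e :: rest := by
    cases exclusion with
    | nil => exact absurd rfl hpre
    | cons e rest => exact ⟨e, rest, rfl⟩
  have hdd : ((PySem.List.pyGet? (e :: rest) 0).getD "") = e := by
    simp [PySem.List.pyGet?, PySem.List.pyIdx?]
  have hd : (e :: rest).contains e = true := by simp
  have hA : FilterAndSeperate text (e :: rest) =
      pvFinA (text.toList.foldl (pvStepA (e :: rest) e) ([], [])) := by
    simp only [FilterAndSeperate, pvFinA, hdd]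
    rfl
  have hB : FilterAndSeperate_alt text (e :: rest) =
      ((((0 : Int) :: ((PySem.List.enumerate text.toList 0).filterMap
          (fun q => if String.ofList [q.2] == e then some q.1 else none)).map (· + 1)).zip
        (((PySem.List.enumerate text.toList 0).filterMap
          (fun q => if String.ofList [q.2] == e then some q.1 else none)) ++ [(text.toList.length : Int)])).map
        (fun q => PySem.List.slice text.toList (some q.1) (some q.2))).map
        (fun s => String.ofList (s.filter (fun ch => !((e :: rest).contains (String.ofList [ch]))))) := by
    simp only [FilterAndSeperate_alt, hdd, List.map_map]
    have hcont : ∀ x : String, (PySem.Set.ofList (e :: rest)).contains x = (e :: rest).contains x := by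
      intro x; simp [PySem.Set.mem_ofList]
    simp only [hcont]
    rfl
  rw [hA, pvA_aux (e :: rest) e hd text.toList [] [],
    pvGlue_nil_word _ _ (pvSegs_ne_nil _ _), hB,
    pvB_eq (fun c => String.ofList [c] == e) text.toList]
  simp
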